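-- pv_equiv track=rewrite | github.com/Vimal-Mahendran/DAA-Assignment | DAA-assignment-9-main/3. Destroy Sequential Targets.py | destroy_sequential_targets
-- ===== SOURCE A (Python) =====
-- def destroy_sequential_targets(nums, space):
--     nums.sort()
--     max_destroyed = 0
--     min_seed = float('inf')
--
--     for num in nums:
--         destroyed = 1
--         target = num + space
--         while target in nums:
--             destroyed += 1
--             target += space
--         if destroyed > max_destroyed or (destroyed == max_destroyed and num < min_seed):
--             max_destroyed = destroyed
--             min_seed = num
--
--     return min_seed
-- ===== SOURCE B (Python) =====
-- def destroy_sequential_targets(nums, space):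
--     s = set(nums)
--     chain = {}
--     for x in sorted(s, reverse=space > 0):
--         chain[x] = 1 + chain.get(x + space, 0)
--     best = max(chain.values())
--     return min(x for x in chain if chain[x] == best)
-- ===== Notes on version B (the rewrite author's own statement) =====
-- stated objective: faster
-- what changed: Replaces the per-element while-loop that rescans the list for each chain step with one pass over the deduplicated elements sorted against the chain direction, memoizing chain lengths in a dict (chain[x] = 1 + chain.get(x+space, 0)), then taking the max/min over the dict.
-- outside the precondition, e.g. on destroy_sequential_targets([], 1): A returns inf, B raises ValueError; on destroy_sequential_targets([1, 2], 0): A does not finish within the time limit, B returns 1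
import Mathlib
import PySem

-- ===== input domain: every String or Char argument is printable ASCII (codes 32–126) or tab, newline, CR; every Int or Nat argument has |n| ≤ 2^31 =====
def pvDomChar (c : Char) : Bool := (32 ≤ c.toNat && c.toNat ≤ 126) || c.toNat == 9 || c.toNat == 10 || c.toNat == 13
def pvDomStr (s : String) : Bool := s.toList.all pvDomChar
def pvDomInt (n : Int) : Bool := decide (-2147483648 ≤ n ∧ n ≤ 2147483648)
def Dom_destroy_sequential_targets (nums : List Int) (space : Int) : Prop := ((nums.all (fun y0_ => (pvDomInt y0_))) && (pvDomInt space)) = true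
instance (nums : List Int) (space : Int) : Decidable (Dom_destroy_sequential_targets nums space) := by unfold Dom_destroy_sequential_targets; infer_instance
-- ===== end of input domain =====

-- B replaces A's per-element membership re-scan chain walk by one pass over the distinct
-- elements sorted against the chain direction with memoized chain lengths (faster).
-- A sorts `nums` in place (a side effect B does not have); the equivalence proved here is
-- about the RETURN value only.

-- ===== PORT A =====
-- Python's `while target in nums` loop, counting successful steps. The fuel argument only
-- makes the loop total: when space ≠ 0 (Pre_) the successful targets are pairwise distinct
-- members of nums, so fuel = nums.length is never exhausted and the count is exact.
def pvChainA (l : List Int) (space : Int) : Nat → Int → Int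
  | 0, _ => 0
  | f + 1, t => if t ∈ l then 1 + pvChainA l space f (t + space) else 0

def destroy_sequential_targets (nums : List Int) (space : Int) : Int :=
  let sortedL := PySem.List.sorted nums (fun x => x) false   -- nums.sort()
  -- state = (max_destroyed, min_seed); none plays float('inf'): num < inf is always true
  let st := sortedL.foldl
    (fun (st : Int × Option Int) num =>
      let destroyed := 1 + pvChainA sortedL space sortedL.length (num + space)
      if destroyed > st.1 ∨ (destroyed = st.1 ∧ (match st.2 with
          | none => true
          | some m => decide (num < m)) = true) then
        (destroyed, some num)
      else st)
    (0, none)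
  -- return min_seed; for empty nums A returns float('inf') (not an Int) — excluded by Pre_
  st.2.getD 0

-- ===== PORT B =====
def destroy_sequential_targets_alt (nums : List Int) (space : Int) : Int :=
  let s := PySem.Set.ofList nums
  let chain := (PySem.List.sorted s (fun x => x) (decide (space > 0))).foldl
    (fun (d : PySem.Dict Int Int) x => d.insert x (1 + d.getD (x + space) 0))
    PySem.Dict.empty
  let best := (PySem.List.max? chain.values (fun v => v)).getD 0   -- max raises on empty dict: excluded by Pre_
  ((PySem.List.min? (chain.keys.filter (fun x => decide (chain.getD x 0 = best))) (fun x => x)).getD 0)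

-- ===== PRECONDITION & SPEC =====
-- Pre_ excludes nums = [] (A returns float('inf'), not an Int; B raises ValueError) and
-- space = 0 (A's while-loop never terminates on any nonempty list).
def Pre_destroy_sequential_targets (nums : List Int) (space : Int) : Prop :=
  nums ≠ [] ∧ space ≠ 0
instance (nums : List Int) (space : Int) : Decidable (Pre_destroy_sequential_targets nums space) := by
  unfold Pre_destroy_sequential_targets; infer_instance

def pvWitness_destroy_sequential_targets : List Int × Int := ([1, 3, 5, 2], 2)

def Spec_destroy_sequential_targets (nums : List Int) (space : Int) (out : Int) : Prop := out = destroy_sequential_targets_alt nums space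
instance (nums : List Int) (space : Int) (out : Int) : Decidable (Spec_destroy_sequential_targets nums space out) := by unfold Spec_destroy_sequential_targets; infer_instance

-- ===== CLAIM (what is proved, stated in full; the proofs are below) =====
def Claim_equal_destroy_sequential_targets : Prop := ∀ (nums : List Int) (space : Int), Dom_destroy_sequential_targets nums space → Pre_destroy_sequential_targets nums space → Spec_destroy_sequential_targets nums space (destroy_sequential_targets nums space)

-- ===== LEMMAS AND PROOFS =====

-- half-line ray membership count: the termination measure of A's while-loop
def pvRay (space t y : Int) : Bool := if space > 0 then decide (t ≤ y) else decide (y ≤ t)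

def pvM (nums : List Int) (space t : Int) : Nat :=
  ((PySem.List.dedup nums).filter (pvRay space t)).length

-- the fuel-free chain length (pvChainA at its stable value)
def pvCL (nums : List Int) (space t : Int) : Int := pvChainA nums space (pvM nums space t) t

-- number destroyed starting from seed x
def pvD (nums : List Int) (space x : Int) : Int := 1 + pvCL nums space (x + space)

lemma pvChainA_nonneg (l : List Int) (sp : Int) : ∀ (f : Nat) (t : Int), 0 ≤ pvChainA l sp f t := by
  intro f
  induction f with
  | zero => intro t; simp [pvChainA]
  | succ f ih =>
    intro t
    simp only [pvChainA]
    split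
    · have := ih (t + sp); omega
    · omega

lemma pvChainA_congr (l l' : List Int) (sp : Int) (h : ∀ y : Int, y ∈ l ↔ y ∈ l') :
    ∀ (f : Nat) (t : Int), pvChainA l sp f t = pvChainA l' sp f t := by
  intro f
  induction f with
  | zero => intro t; simp [pvChainA]
  | succ f ih =>
    intro t
    simp only [pvChainA, h t]
    split
    · rw [ih]
    · rfl

lemma pvFilter_mono_length {α : Type} (p p' : α → Bool) (l : List α)
    (h : ∀ y, p' y = true → p y = true) : (l.filter p').length ≤ (l.filter p).length := by
  induction l with
  | nil => simp
  | cons a rest ih =>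
    by_cases ha' : p' a = true
    · have ha := h a ha'
      simp [ha', ha]; omega
    · simp only [List.filter_cons]
      rw [if_neg (by simp_all)]
      split
      · simp; omega
      · exact ih

lemma pvFilter_lt_length {α : Type} [DecidableEq α] (p p' : α → Bool) (l : List α)
    (h : ∀ y, p' y = true → p y = true) (t : α) (ht : t ∈ l) (hpt : p t = true)
    (hpt' : p' t = false) : (l.filter p').length < (l.filter p).length := by
  induction l with
  | nil => simp at ht
  | cons a rest ih =>
    by_cases hat : a = t
    · subst hat
      simp only [List.filter_cons, hpt]
      rw [if_neg (by simp [hpt'])]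
      rw [if_pos (by simp)]
      have := pvFilter_mono_length p p' rest h
      simp; omega
    · have htr : t ∈ rest := by
        rcases List.mem_cons.mp ht with h1 | h1
        · exact absurd h1.symm hat
        · exact h1
      have := ih htr
      simp only [List.filter_cons]
      by_cases ha' : p' a = true
      · have ha := h a ha'
        simp [ha', ha]; omega
      · rw [if_neg (by simp_all)]
        split
        · simp; omega
        · exact this

lemma pvM_pos (nums : List Int) (sp t : Int) (ht : t ∈ nums) : 1 ≤ pvM nums sp t := by
  have hmem : t ∈ (PySem.List.dedup nums).filter (pvRay sp t) := by
    rw [List.mem_filter]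
    refine ⟨(PySem.List.mem_dedup _ _).mpr ht, ?_⟩
    simp only [pvRay]
    split <;> simp
  rw [pvM]
  exact List.length_pos_of_mem hmem

lemma pvM_not_mem (nums : List Int) (sp t : Int) (h : pvM nums sp t = 0) : t ∉ nums := by
  intro ht
  have := pvM_pos nums sp t ht
  omega

lemma pvSet_foldl_add_length_le : ∀ (xs s : List Int),
    (List.foldl PySem.Set.add s xs).length ≤ s.length + xs.length := by
  intro xs
  induction xs with
  | nil => intro s; simp
  | cons x rest ih =>
    intro s
    have h1 : (PySem.Set.add s x).length ≤ s.length + 1 := by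
      simp only [PySem.Set.add]
      split
      · omega
      · simp
    calc (List.foldl PySem.Set.add s (x :: rest)).length
        = (List.foldl PySem.Set.add (PySem.Set.add s x) rest).length := by simp [List.foldl]
      _ ≤ (PySem.Set.add s x).length + rest.length := ih _
      _ ≤ s.length + (x :: rest).length := by simp; omega

lemma pvM_le_length (nums : List Int) (sp t : Int) : pvM nums sp t ≤ nums.length := by
  have h1 : pvM nums sp t ≤ (PySem.List.dedup nums).length := List.length_filter_le _ _
  have h2 : (PySem.List.dedup nums).length ≤ nums.length := by
    have := pvSet_foldl_add_length_le nums []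
    simpa [PySem.List.dedup_eq_ofList, PySem.Set.ofList_eq_foldl] using this
  omega

lemma pvM_step (nums : List Int) (sp t : Int) (hsp : sp ≠ 0) (ht : t ∈ nums) :
    pvM nums sp (t + sp) < pvM nums sp t := by
  apply pvFilter_lt_length (pvRay sp t) (pvRay sp (t + sp)) _ _ t
    ((PySem.List.mem_dedup _ _).mpr ht)
  · simp only [pvRay]; split <;> simp
  · simp only [pvRay]; split <;> simp <;> omega
  · intro y
    simp only [pvRay]
    split <;> simp <;> omega

lemma pvChainA_fuel (nums : List Int) (sp : Int) (hsp : sp ≠ 0) :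
    ∀ (n : Nat) (t : Int) (f : Nat), pvM nums sp t ≤ n → pvM nums sp t ≤ f →
      pvChainA nums sp f t = pvCL nums sp t := by
  intro n
  induction n with
  | zero =>
    intro t f h0 hf
    have hnm : t ∉ nums := pvM_not_mem nums sp t (by omega)
    cases f with
    | zero => simp [pvCL, (by omega : pvM nums sp t = 0), pvChainA]
    | succ f => simp [pvCL, (by omega : pvM nums sp t = 0), pvChainA, hnm]
  | succ n ih =>
    intro t f hn hf
    by_cases hmem : t ∈ nums
    · have h1 : 1 ≤ pvM nums sp t := pvM_pos nums sp t hmem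
      obtain ⟨m', hm'⟩ : ∃ m', pvM nums sp t = m' + 1 := ⟨pvM nums sp t - 1, by omega⟩
      obtain ⟨f', hf'⟩ : ∃ f', f = f' + 1 := ⟨f - 1, by omega⟩
      have hstep := pvM_step nums sp t hsp hmem
      subst hf'
      rw [pvCL, hm']
      simp only [pvChainA, if_pos hmem]
      have e1 : pvChainA nums sp f' (t + sp) = pvCL nums sp (t + sp) :=
        ih (t + sp) f' (by omega) (by omega)
      have e2 : pvChainA nums sp m' (t + sp) = pvCL nums sp (t + sp) :=
        ih (t + sp) m' (by omega) (by omega)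
      rw [e1, e2]
    · cases f with
      | zero =>
        have : pvM nums sp t = 0 := by omega
        simp [pvCL, this, pvChainA]
      | succ f =>
        rw [pvCL]
        cases hM : pvM nums sp t with
        | zero => simp [pvChainA, hmem]
        | succ m' => simp [pvChainA, hmem]

lemma pvChainA_eq_pvCL (nums : List Int) (sp : Int) (hsp : sp ≠ 0) (t : Int) (f : Nat)
    (hf : pvM nums sp t ≤ f) : pvChainA nums sp f t = pvCL nums sp t :=
  pvChainA_fuel nums sp hsp (pvM nums sp t) t f le_rfl hf

lemma pvCL_unfold (nums : List Int) (sp : Int) (hsp : sp ≠ 0) (t : Int) :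
    pvCL nums sp t = if t ∈ nums then 1 + pvCL nums sp (t + sp) else 0 := by
  by_cases hmem : t ∈ nums
  · have h1 : 1 ≤ pvM nums sp t := pvM_pos nums sp t hmem
    obtain ⟨m', hm'⟩ : ∃ m', pvM nums sp t = m' + 1 := ⟨pvM nums sp t - 1, by omega⟩
    have hstep := pvM_step nums sp t hsp hmem
    rw [pvCL, hm']
    simp only [pvChainA, if_pos hmem]
    rw [pvChainA_eq_pvCL nums sp hsp (t + sp) m' (by omega)]
  · rw [pvCL]
    cases hM : pvM nums sp t with
    | zero => simp [pvChainA, hmem]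
    | succ m' => simp [pvChainA, hmem]

lemma pvD_unfold (nums : List Int) (sp : Int) (hsp : sp ≠ 0) (x : Int) :
    pvD nums sp x = if x + sp ∈ nums then 1 + pvD nums sp (x + sp) else 1 := by
  rw [pvD, pvCL_unfold nums sp hsp (x + sp)]
  split <;> simp [pvD]

lemma pvD_pos (nums : List Int) (sp x : Int) : 1 ≤ pvD nums sp x := by
  have := pvChainA_nonneg nums sp (pvM nums sp (x + sp)) (x + sp)
  simp only [pvD, pvCL]
  omega

-- ----- A side -----

def pvStepA (S : List Int) (space : Int) (st : Int × Option Int) (num : Int) : Int × Option Int :=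
  let destroyed := 1 + pvChainA S space S.length (num + space)
  if destroyed > st.1 ∨ (destroyed = st.1 ∧ (match st.2 with
      | none => true
      | some m => decide (num < m)) = true) then
    (destroyed, some num)
  else st

lemma pvDestroyA_eq (nums : List Int) (space : Int) :
    destroy_sequential_targets nums space =
      (((PySem.List.sorted nums (fun x => x) false).foldl
        (pvStepA (PySem.List.sorted nums (fun x => x) false) space) (0, none)).2).getD 0 := rfl

lemma pvDestroyedA_eq_pvD (nums : List Int) (space : Int) (hsp : space ≠ 0) (num : Int) :
    1 + pvChainA (PySem.List.sorted nums (fun x => x) false) space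
      (PySem.List.sorted nums (fun x => x) false).length (num + space) = pvD nums space num := by
  have hmem : ∀ y : Int, y ∈ PySem.List.sorted nums (fun x => x) false ↔ y ∈ nums := by
    intro y; simp [PySem.List.mem_sorted]
  rw [pvChainA_congr _ nums space hmem]
  rw [PySem.List.length_sorted]
  rw [pvChainA_eq_pvCL nums space hsp (num + space) nums.length (pvM_le_length nums space _)]
  rfl

def pvAInv (nums : List Int) (space : Int) (l : List Int) (st : Int × Option Int) : Prop :=
  (l = [] ∧ st = (0, none)) ∨
    ∃ r, st = (pvD nums space r, some r) ∧ r ∈ l ∧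
      ∀ y ∈ l, pvD nums space y ≤ pvD nums space r ∧ (pvD nums space y = pvD nums space r → r ≤ y)

lemma pvA_fold (nums : List Int) (space : Int) (hsp : space ≠ 0) :
    ∀ (suffix p : List Int) (st : Int × Option Int),
      (p ++ suffix).Pairwise (· ≤ ·) → pvAInv nums space p st →
      pvAInv nums space (p ++ suffix)
        (suffix.foldl (pvStepA (PySem.List.sorted nums (fun x => x) false) space) st) := by
  intro suffix
  induction suffix with
  | nil => intro p st _ hinv; simpa using hinv
  | cons x rest ih =>
    intro p st hpw hinv
    have hle : ∀ y ∈ p, y ≤ x := by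
      intro y hy
      have := (List.pairwise_append.mp hpw).2.2 y hy x (by simp)
      exact this
    have hstep : pvAInv nums space (p ++ [x])
        (pvStepA (PySem.List.sorted nums (fun x => x) false) space st x) := by
      simp only [pvStepA, pvDestroyedA_eq_pvD nums space hsp x]
      rcases hinv with ⟨hp, hst⟩ | ⟨r, hst, hr, hmax⟩
      · subst hst; subst hp
        rw [if_pos (by left; exact lt_of_lt_of_le Int.zero_lt_one (pvD_pos nums space x))]
        right
        exact ⟨x, rfl, by simp, by simp⟩
      · subst hst
        have hrx : r ≤ x := hle r hr
        by_cases hgt : pvD nums space x > pvD nums space r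
        · rw [if_pos (Or.inl hgt)]
          right
          refine ⟨x, rfl, by simp, ?_⟩
          intro y hy
          rcases List.mem_append.mp hy with hy | hy
          · have := (hmax y hy).1
            constructor
            · omega
            · intro he; omega
          · simp at hy; subst hy; exact ⟨le_rfl, fun _ => le_rfl⟩
        · rw [if_neg ?_]
          · right
            refine ⟨r, rfl, List.mem_append_left _ hr, ?_⟩
            intro y hy
            rcases List.mem_append.mp hy with hy | hy
            · exact hmax y hy
            · simp at hy; subst hy
              exact ⟨by omega, fun _ => hrx⟩
          · simp only [not_or]
            refine ⟨hgt, ?_⟩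
            rintro ⟨heq, hlt⟩
            simp only [decide_eq_true_eq] at hlt
            omega
    have := ih (p ++ [x]) _ (by simpa using hpw) hstep
    simpa using this

-- A's characterisation: the result is the minimal seed among elements maximising pvD
lemma pvA_char (nums : List Int) (space : Int) (hne : nums ≠ []) (hsp : space ≠ 0) :
    ∃ r, destroy_sequential_targets nums space = r ∧ r ∈ nums ∧
      ∀ y ∈ nums, pvD nums space y ≤ pvD nums space r ∧
        (pvD nums space y = pvD nums space r → r ≤ y) := by
  have hS : ∀ y : Int, y ∈ PySem.List.sorted nums (fun x => x) false ↔ y ∈ nums := by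
    intro y; simp [PySem.List.mem_sorted]
  have hpw : (PySem.List.sorted nums (fun x => x) false).Pairwise (· ≤ ·) :=
    PySem.List.sorted_pairwise _ _
  have hfold := pvA_fold nums space hsp (PySem.List.sorted nums (fun x => x) false) [] (0, none)
    (by simpa using hpw) (Or.inl ⟨rfl, rfl⟩)
  simp only [List.nil_append] at hfold
  rcases hfold with ⟨hS0, _⟩ | ⟨r, hst, hr, hmax⟩
  · exact absurd ((PySem.List.sorted_eq_nil_iff _ _ _).mp hS0) hne
  · refine ⟨r, ?_, (hS r).mp hr, fun y hy => hmax y ((hS y).mpr hy)⟩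
    rw [pvDestroyA_eq, hst]
    rfl

-- ----- B side -----

def pvOrder (nums : List Int) (space : Int) : List Int :=
  PySem.List.sorted (PySem.Set.ofList nums) (fun x => x) (decide (space > 0))

def pvStepB (space : Int) (d : PySem.Dict Int Int) (x : Int) : PySem.Dict Int Int :=
  d.insert x (1 + d.getD (x + space) 0)

def pvChainDict (nums : List Int) (space : Int) : PySem.Dict Int Int :=
  (pvOrder nums space).foldl (pvStepB space) PySem.Dict.empty

lemma pvAltB_eq (nums : List Int) (space : Int) :
    destroy_sequential_targets_alt nums space =
      (PySem.List.min? ((pvChainDict nums space).keys.filter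
        (fun x => decide ((pvChainDict nums space).getD x 0 =
          (PySem.List.max? (pvChainDict nums space).values (fun v => v)).getD 0)))
        (fun x => x)).getD 0 := rfl

lemma pvMem_order (nums : List Int) (space : Int) (y : Int) :
    y ∈ pvOrder nums space ↔ y ∈ nums := by
  simp [pvOrder, PySem.List.mem_sorted, PySem.Set.mem_ofList]

lemma pvNodup_order (nums : List Int) (space : Int) : (pvOrder nums space).Nodup := by
  have h1 : (PySem.Set.ofList nums : List Int).Nodup := PySem.Set.nodup_ofList nums
  exact ((PySem.List.sorted_perm _ _ _).nodup_iff).mpr h1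

-- every element of nums strictly beyond x in the chain direction occurs BEFORE x in pvOrder
lemma pvOrder_sep (nums : List Int) (space : Int) (hsp : space ≠ 0) (p rest : List Int) (x : Int)
    (hdec : pvOrder nums space = p ++ x :: rest) (hx : x + space ∈ nums) : x + space ∈ p := by
  have hmem : x + space ∈ pvOrder nums space := (pvMem_order nums space _).mpr hx
  rw [hdec] at hmem
  rcases List.mem_append.mp hmem with hp | hxr
  · exact hp
  · exfalso
    rcases List.mem_cons.mp hxr with he | hr
    · omega
    · by_cases hpos : space > 0
      · have hpw : (pvOrder nums space).Pairwise (fun a b => b < a) := by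
          have hge : (pvOrder nums space).Pairwise (fun a b => b ≤ a) := by
            simpa [pvOrder, hpos] using
              PySem.List.sorted_pairwise_rev (PySem.Set.ofList nums) (fun x : Int => x)
          have hne : (pvOrder nums space).Pairwise (fun a b : Int => a ≠ b) :=
            pvNodup_order nums space
          exact (hge.and hne).imp (fun h => lt_of_le_of_ne h.1 (Ne.symm h.2))
        rw [hdec] at hpw
        have := ((List.pairwise_append.mp hpw).2.1)
        have := (List.pairwise_cons.mp this).1 _ hr
        omega
      · have hpw : (pvOrder nums space).Pairwise (fun a b => a < b) := by
          simpa [pvOrder, hpos] using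
            PySem.List.sorted_ofList_pairwise_lt nums
        rw [hdec] at hpw
        have := ((List.pairwise_append.mp hpw).2.1)
        have := (List.pairwise_cons.mp this).1 _ hr
        omega

lemma pvB_fold (nums : List Int) (space : Int) (hsp : space ≠ 0) :
    ∀ (suffix p : List Int) (d : PySem.Dict Int Int),
      pvOrder nums space = p ++ suffix →
      (∀ y, d.getD y 0 = if y ∈ p then pvD nums space y else 0) →
      ∀ y, ((suffix.foldl (pvStepB space) d).getD y 0) =
        if y ∈ pvOrder nums space then pvD nums space y else 0 := by
  intro suffix
  induction suffix with
  | nil =>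
    intro p d hdec hinv y
    simp only [List.foldl_nil]
    rw [hinv y, hdec]
    simp
  | cons x rest ih =>
    intro p d hdec hinv y
    have hv : 1 + d.getD (x + space) 0 = pvD nums space x := by
      by_cases hx : x + space ∈ nums
      · have hp := pvOrder_sep nums space hsp p rest x hdec hx
        rw [hinv, if_pos hp, pvD_unfold nums space hsp x, if_pos hx]
      · have hnp : x + space ∉ p := by
          intro hp
          exact hx ((pvMem_order nums space _).mp (by rw [hdec]; exact List.mem_append_left _ hp))
        rw [hinv, if_neg hnp, pvD_unfold nums space hsp x, if_neg hx]
        norm_num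
    simp only [List.foldl_cons]
    apply ih (p ++ [x]) _ (by rw [hdec]; simp)
    intro z
    simp only [pvStepB]
    rw [PySem.Dict.getD_insert]
    by_cases hz : z = x
    · subst hz
      rw [if_pos rfl, if_pos (by simp), hv]
    · rw [if_neg hz, hinv z]
      by_cases hzp : z ∈ p
      · rw [if_pos hzp, if_pos (by simp [hzp])]
      · rw [if_neg hzp, if_neg (by simp [hzp, hz])]

lemma pvSet_foldl_add_nodup : ∀ (l s : List Int), (s ++ l).Nodup →
    List.foldl PySem.Set.add s l = s ++ l := by
  intro l
  induction l with
  | nil => intro s _; simp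
  | cons x t ih =>
    intro s hnd
    have hxs : x ∉ s := by
      intro hx
      exact (List.disjoint_of_nodup_append hnd) hx (by simp)
    have hadd : PySem.Set.add s x = s ++ [x] := by
      simp only [PySem.Set.add]
      rw [if_neg (by simpa [PySem.Set.contains] using hxs)]
    simp only [List.foldl_cons, hadd]
    rw [ih (s ++ [x]) (by simpa using hnd)]
    simp

lemma pvKeys_chain (nums : List Int) (space : Int) :
    (pvChainDict nums space).keys = pvOrder nums space := by
  have h := PySem.Dict.keys_foldl_insert (pvOrder nums space)
    (fun (d : PySem.Dict Int Int) (x : Int) => 1 + d.getD (x + space) 0) PySem.Dict.empty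
  have h2 : (pvChainDict nums space).keys =
      PySem.Set.update (PySem.Dict.empty : PySem.Dict Int Int).keys (pvOrder nums space) := h
  rw [h2, PySem.Dict.keys_empty]
  simp only [PySem.Set.update]
  exact pvSet_foldl_add_nodup _ [] (by simpa using pvNodup_order nums space)

lemma pvNodupKeys_chain (nums : List Int) (space : Int) :
    (pvChainDict nums space).keys.Nodup := by
  rw [pvKeys_chain]; exact pvNodup_order nums space

lemma pvGetD_chain (nums : List Int) (space : Int) (hsp : space ≠ 0) (y : Int) :
    (pvChainDict nums space).getD y 0 = if y ∈ nums then pvD nums space y else 0 := by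
  have := pvB_fold nums space hsp (pvOrder nums space) [] PySem.Dict.empty (by simp)
    (by intro y; simp [PySem.Dict.getD_empty]) y
  rw [pvChainDict, this]
  by_cases hy : y ∈ nums
  · rw [if_pos ((pvMem_order nums space y).mpr hy), if_pos hy]
  · rw [if_neg (fun h => hy ((pvMem_order nums space y).mp h)), if_neg hy]

lemma pvValues_chain (nums : List Int) (space : Int) (hsp : space ≠ 0) :
    (pvChainDict nums space).values = (pvOrder nums space).map (fun k => pvD nums space k) := by
  rw [PySem.Dict.values_eq_map_keys _ (pvNodupKeys_chain nums space) 0, pvKeys_chain]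
  apply List.map_congr_left
  intro x hx
  rw [pvGetD_chain nums space hsp, if_pos ((pvMem_order nums space x).mp hx)]

-- B's characterisation: the result is the minimal seed among elements maximising pvD
lemma pvB_char (nums : List Int) (space : Int) (hne : nums ≠ []) (hsp : space ≠ 0) :
    ∃ m, destroy_sequential_targets_alt nums space = m ∧ m ∈ nums ∧
      ∀ y ∈ nums, pvD nums space y ≤ pvD nums space m ∧
        (pvD nums space y = pvD nums space m → m ≤ y) := by
  obtain ⟨a, ha⟩ : ∃ a, a ∈ nums := by
    cases nums with
    | nil => exact absurd rfl hne
    | cons a t => exact ⟨a, by simp⟩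
  have hao : a ∈ pvOrder nums space := (pvMem_order nums space a).mpr ha
  have hvals := pvValues_chain nums space hsp
  have hvne : (pvChainDict nums space).values ≠ [] := by
    rw [hvals]
    intro h
    rw [List.map_eq_nil_iff] at h
    rw [h] at hao
    simp at hao
  cases hmax : PySem.List.max? (pvChainDict nums space).values (fun v => v) with
  | none => exact absurd ((PySem.List.max?_eq_none_iff _ _).mp hmax) hvne
  | some b =>
    have hbmem : b ∈ (pvChainDict nums space).values := PySem.List.max?_mem hmax
    have hble : ∀ v ∈ (pvChainDict nums space).values, v ≤ b := by
      intro v hv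
      exact PySem.List.max?_isMax hmax v hv
    have hFeq : ((pvChainDict nums space).keys.filter
        (fun x => decide ((pvChainDict nums space).getD x 0 = b))) =
        (pvOrder nums space).filter (fun x => decide (pvD nums space x = b)) := by
      rw [pvKeys_chain]
      apply List.filter_congr
      intro x hx
      rw [pvGetD_chain nums space hsp, if_pos ((pvMem_order nums space x).mp hx)]
    have hbD : ∃ x0, x0 ∈ pvOrder nums space ∧ pvD nums space x0 = b := by
      rw [hvals] at hbmem
      obtain ⟨x0, hx0, he⟩ := List.mem_map.mp hbmem
      exact ⟨x0, hx0, he⟩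
    obtain ⟨x0, hx0o, hx0b⟩ := hbD
    have hFne : (pvOrder nums space).filter (fun x => decide (pvD nums space x = b)) ≠ [] := by
      intro h
      have : x0 ∈ (pvOrder nums space).filter (fun x => decide (pvD nums space x = b)) :=
        List.mem_filter.mpr ⟨hx0o, by simp [hx0b]⟩
      rw [h] at this
      simp at this
    cases hmin : PySem.List.min? ((pvOrder nums space).filter
        (fun x => decide (pvD nums space x = b))) (fun x => x) with
    | none => exact absurd ((PySem.List.min?_eq_none_iff _ _).mp hmin) hFne
    | some m =>
      have hmF := PySem.List.min?_mem hmin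
      have hmmin : ∀ y ∈ (pvOrder nums space).filter (fun x => decide (pvD nums space x = b)),
          m ≤ y := by
        intro y hy
        exact PySem.List.min?_isMin hmin y hy
      obtain ⟨hmo, hmb⟩ := List.mem_filter.mp hmF
      have hmb : pvD nums space m = b := by simpa using hmb
      refine ⟨m, ?_, (pvMem_order nums space m).mp hmo, ?_⟩
      · rw [pvAltB_eq]
        have hb' : (PySem.List.max? (pvChainDict nums space).values (fun v => v)).getD 0 = b := by
          rw [hmax]; rfl
        simp only [hb', hFeq, hmin, Option.getD_some]
      · intro y hy
        have hyo : y ∈ pvOrder nums space := (pvMem_order nums space y).mpr hy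
        have hyv : pvD nums space y ∈ (pvChainDict nums space).values := by
          rw [hvals]
          exact List.mem_map.mpr ⟨y, hyo, rfl⟩
        constructor
        · rw [hmb]; exact hble _ hyv
        · intro he
          apply hmmin
          exact List.mem_filter.mpr ⟨hyo, by simp [he, hmb]⟩

-- ===== VERDICT (by name: the statement is the Claim_ definition above) =====
theorem destroy_sequential_targets_spec : Claim_equal_destroy_sequential_targets := by
  intro nums space _ hpre
  obtain ⟨hne, hsp⟩ := hpre
  obtain ⟨r, hra, hrm, hrmax⟩ := pvA_char nums space hne hsp
  obtain ⟨m, hmb, hmm, hmmax⟩ := pvB_char nums space hne hsp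
  unfold Spec_destroy_sequential_targets
  rw [hra, hmb]
  have h1 := (hrmax m hmm).1
  have h2 := (hmmax r hrm).1
  have heq : pvD nums space m = pvD nums space r := le_antisymm h1 h2
  have := (hrmax m hmm).2 heq
  have := (hmmax r hrm).2 heq.symm
  omega
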